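-- pv_equiv track=rewrite | github.com/amsqr/holist | link/NamedEntityIndex.py | countEntities
-- ===== SOURCE A (Python) =====
-- from collections import defaultdict
--
-- def countEntities(entities):
--     entityCounts = defaultdict(int)
--     for idx, (entityType, entity) in enumerate(entities):
--         # first, update the raw count of this entity
--         entityCounts[entity] += 1
--
--         # next, see if this entity might be equivalent to any of the previous entities
--         for otherEntityType, otherEntity in entities[:idx]:
--             parts = otherEntity.split(" ")
--             # if the entity is a true subset of another entity, increment the frequency for the other one as well
--             # This lets us better resolve situations where a person is mentioned (Firstname, Lastname),
--             # but subsequently only mentioned by last name.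
--             # This also helps with organizations (Apple vs. Apple Computers).
--             if len(parts) != 1 and entity in parts:
--                 entityCounts[otherEntity] += 1
--
--     return entityCounts
-- ===== SOURCE B (Python) =====
-- def countEntities(entities):
--     counts = {}
--     wordIndex = {}  # word -> {multi-word entity containing that word -> occurrences so far}
--     for entityType, entity in entities:
--         counts[entity] = counts.get(entity, 0) + 1
--         for other, c in wordIndex.get(entity, {}).items():
--             counts[other] = counts.get(other, 0) + c
--         parts = entity.split(" ")
--         if len(parts) != 1:
--             for p in dict.fromkeys(parts):
--                 bucket = wordIndex.setdefault(p, {})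
--                 bucket[entity] = bucket.get(entity, 0) + 1
--     return counts
-- ===== Notes on version B (the rewrite author's own statement) =====
-- stated objective: faster
-- what changed: Replaces the rescan of all previous entities (re-splitting each) at every step by an incrementally maintained word -> (multi-word entity -> occurrences) index, so each step does one dictionary lookup on the current entity plus one update per word of it.
import Mathlib
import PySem

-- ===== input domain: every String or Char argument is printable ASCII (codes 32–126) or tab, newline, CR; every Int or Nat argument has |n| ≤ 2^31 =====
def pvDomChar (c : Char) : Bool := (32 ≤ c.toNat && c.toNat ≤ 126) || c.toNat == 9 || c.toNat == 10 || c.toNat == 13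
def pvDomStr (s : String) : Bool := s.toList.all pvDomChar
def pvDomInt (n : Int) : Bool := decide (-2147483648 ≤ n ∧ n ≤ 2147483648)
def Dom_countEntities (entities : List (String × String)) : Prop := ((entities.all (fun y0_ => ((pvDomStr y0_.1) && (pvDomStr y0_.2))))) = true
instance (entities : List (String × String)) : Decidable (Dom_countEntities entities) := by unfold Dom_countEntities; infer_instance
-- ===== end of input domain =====

-- B replaces A's quadratic rescan (re-splitting every previous entity at each step) by an
-- incrementally maintained word → (multi-word entity → occurrences) index; return values are equal.

-- s.split(" "): the separator is the nonempty literal " ", so Python never raises and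
-- PySem.Str.split? is always `some`; the getD default is unreachable (exact).
def pvParts (s : String) : List String := (PySem.Str.split? s " ").getD []

-- ===== PORT A =====
def countEntities (entities : List (String × String)) : List (String × Int) :=
  ((PySem.List.enumerate entities).foldl
    (fun (entityCounts : PySem.Dict String Int) (ip : Int × (String × String)) =>
      let entity := ip.2.2
      let entityCounts := entityCounts.insert entity (entityCounts.getD entity 0 + 1)
      (PySem.List.slice entities none (some ip.1)).foldl
        (fun ec (q : String × String) =>
          let parts := pvParts q.2
          if parts.length ≠ 1 ∧ entity ∈ parts then ec.insert q.2 (ec.getD q.2 0 + 1) else ec)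
        entityCounts)
    PySem.Dict.empty).items

-- ===== PORT B =====
def countEntities_alt (entities : List (String × String)) : List (String × Int) :=
  (entities.foldl
    (fun (st : PySem.Dict String Int × PySem.Dict String (PySem.Dict String Int)) (p : String × String) =>
      let entity := p.2
      let counts := st.1.insert entity (st.1.getD entity 0 + 1)
      let counts := (st.2.getD entity PySem.Dict.empty).items.foldl
        (fun c (oc : String × Int) => c.insert oc.1 (c.getD oc.1 0 + oc.2)) counts
      let parts := pvParts entity
      let wIdx :=
        if parts.length ≠ 1 then
          (PySem.List.dedup parts).foldl
            (fun w pt =>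
              let bucket := w.getD pt PySem.Dict.empty
              w.insert pt (bucket.insert entity (bucket.getD entity 0 + 1)))
            st.2
        else st.2
      (counts, wIdx))
    (PySem.Dict.empty, PySem.Dict.empty)).1.items

-- ===== PRECONDITION & SPEC =====
def Spec_countEntities (entities : List (String × String)) (out : List (String × Int)) : Prop := out = countEntities_alt entities
instance (entities : List (String × String)) (out : List (String × Int)) : Decidable (Spec_countEntities entities out) := by unfold Spec_countEntities; infer_instance

-- ===== CLAIM (what is proved, stated in full; the proofs are below) =====
def Claim_equal_countEntities : Prop := ∀ (entities : List (String × String)), Dom_countEntities entities → Spec_countEntities entities (countEntities entities)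

-- ===== LEMMAS AND PROOFS =====

-- `counts[k] = counts.get(k, 0) + n`
def pvAdd (c : PySem.Dict String Int) (k : String) (n : Int) : PySem.Dict String Int :=
  c.insert k (c.getD k 0 + n)

-- B's bump loop over the items of a bucket
def pvBump (L : List (String × Int)) (c : PySem.Dict String Int) : PySem.Dict String Int :=
  L.foldl (fun c p => pvAdd c p.1 p.2) c

-- total increment a list of (key, amount) pairs contributes to key k
def pvSum (L : List (String × Int)) (k : String) : Int :=
  ((L.filter (fun p => p.1 == k)).map Prod.snd).sum

-- pointwise update of every value of a dict (keys and order untouched)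
def pvUpd (c : PySem.Dict String Int) (F : String → Int) : PySem.Dict String Int :=
  PySem.Dict.mk (c.items.map (fun q => (q.1, q.2 + F q.1)))

-- A's inner loop over the prefix
def pvInner (e : String) (l : List (String × String)) (c : PySem.Dict String Int) : PySem.Dict String Int :=
  l.foldl (fun ec q =>
    if (pvParts q.2).length ≠ 1 ∧ e ∈ pvParts q.2 then pvAdd ec q.2 1 else ec) c

-- B's word-index update loop over the distinct parts of the current entity
def pvWFold (ps : List String) (e : String) (w : PySem.Dict String (PySem.Dict String Int)) :
    PySem.Dict String (PySem.Dict String Int) :=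
  ps.foldl (fun w pt =>
    w.insert pt ((w.getD pt PySem.Dict.empty).insert e ((w.getD pt PySem.Dict.empty).getD e 0 + 1))) w

def pvBStep (st : PySem.Dict String Int × PySem.Dict String (PySem.Dict String Int))
    (p : String × String) : PySem.Dict String Int × PySem.Dict String (PySem.Dict String Int) :=
  (pvBump ((st.2.getD p.2 PySem.Dict.empty).items) (pvAdd st.1 p.2 1),
   if (pvParts p.2).length ≠ 1 then pvWFold (PySem.List.dedup (pvParts p.2)) p.2 st.2 else st.2)

def pvBS (l : List (String × String)) :
    PySem.Dict String Int × PySem.Dict String (PySem.Dict String Int) :=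
  l.foldl pvBStep (PySem.Dict.empty, PySem.Dict.empty)

def pvALoop (base : List (String × String)) (il : List (Int × (String × String)))
    (d : PySem.Dict String Int) : PySem.Dict String Int :=
  il.foldl (fun d ip => pvInner ip.2.2 (PySem.List.slice base none (some ip.1)) (pvAdd d ip.2.2 1)) d

def pvAD (l : List (String × String)) : PySem.Dict String Int :=
  pvALoop l (PySem.List.enumerate l 0) PySem.Dict.empty

theorem pv_countEntities_eq (l : List (String × String)) : countEntities l = (pvAD l).items := rfl

theorem pv_countEntities_alt_eq (l : List (String × String)) :
    countEntities_alt l = (pvBS l).1.items := rfl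

theorem pv_upd_items (c : PySem.Dict String Int) (F : String → Int) :
    (pvUpd c F).items = c.items.map (fun q => (q.1, q.2 + F q.1)) := rfl

theorem pv_upd_keys (c : PySem.Dict String Int) (F : String → Int) :
    (pvUpd c F).keys = c.keys := by
  simp [pvUpd, PySem.Dict.keys]

theorem pv_upd_contains (c : PySem.Dict String Int) (F : String → Int) (k : String) :
    (pvUpd c F).contains k = c.contains k := by
  rw [PySem.Dict.contains_eq_decide_mem_keys, PySem.Dict.contains_eq_decide_mem_keys, pv_upd_keys]

theorem pv_upd_zero (c : PySem.Dict String Int) : pvUpd c (fun _ => 0) = c := by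
  apply PySem.Dict.ext; simp [pvUpd]

theorem pv_upd_upd (c : PySem.Dict String Int) (F G : String → Int) :
    pvUpd (pvUpd c F) G = pvUpd c (fun k => F k + G k) := by
  apply PySem.Dict.ext
  simp only [pv_upd_items, List.map_map]
  exact List.map_congr_left (fun q _ => by simp [add_assoc])

theorem pv_upd_congr (c : PySem.Dict String Int) (F G : String → Int) (h : ∀ k, F k = G k) :
    pvUpd c F = pvUpd c G := by
  rw [funext h]

theorem pv_add_upd (c : PySem.Dict String Int) (k : String) (n : Int)
    (hnd : c.keys.Nodup) (hk : c.contains k = true) :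
    pvAdd c k n = pvUpd c (fun k' => if k' = k then n else 0) := by
  apply PySem.Dict.ext
  show (c.insert k (c.getD k 0 + n)).items = _
  rw [PySem.Dict.items_insert_of_contains c _ hk, pv_upd_items]
  apply List.map_congr_left
  rintro ⟨pk, pv⟩ hp
  by_cases hpk : pk = k
  · subst hpk
    have : c.getD pk 0 = pv := PySem.Dict.getD_of_mem_items c hp hnd 0
    simp [this]
  · simp [hpk]

theorem pv_sum_nil (k : String) : pvSum [] k = 0 := rfl

theorem pv_sum_cons (p : String × Int) (L : List (String × Int)) (k : String) :
    pvSum (p :: L) k = (if k = p.1 then p.2 else 0) + pvSum L k := by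
  by_cases h : p.1 = k
  · subst h; simp [pvSum]
  · simp [pvSum, h, Ne.symm h]

theorem pv_bump_upd (L : List (String × Int)) (c : PySem.Dict String Int)
    (hnd : c.keys.Nodup) (hL : ∀ p ∈ L, c.contains p.1 = true) :
    pvBump L c = pvUpd c (pvSum L) := by
  induction L generalizing c with
  | nil =>
    show c = _
    rw [pv_upd_congr c (pvSum []) (fun _ => 0) pv_sum_nil, pv_upd_zero]
  | cons p L ih =>
    show pvBump L (pvAdd c p.1 p.2) = _
    rw [pv_add_upd c p.1 p.2 hnd (hL p (List.mem_cons_self ..))]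
    rw [ih _ (by rw [pv_upd_keys]; exact hnd)
          (fun q hq => by rw [pv_upd_contains]; exact hL q (List.mem_cons_of_mem _ hq))]
    rw [pv_upd_upd]
    exact pv_upd_congr _ _ _ (fun k => (pv_sum_cons p L k).symm)

theorem pv_inner_bump (e : String) (l : List (String × String)) (c : PySem.Dict String Int) :
    pvInner e l c =
      pvBump ((l.filter (fun q => decide ((pvParts q.2).length ≠ 1 ∧ e ∈ pvParts q.2))).map
        (fun q => (q.2, (1 : Int)))) c := by
  unfold pvInner pvBump
  rw [PySem.List.foldl_ite_eq_foldl_filter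
        (fun q : String × String => (pvParts q.2).length ≠ 1 ∧ e ∈ pvParts q.2)
        (fun ec q => pvAdd ec q.2 1) l c]
  rw [List.foldl_map]

theorem pv_sum_filter (l : List (String × String)) (k e : String) :
    pvSum ((l.filter (fun q => decide ((pvParts q.2).length ≠ 1 ∧ e ∈ pvParts q.2))).map
        (fun q => (q.2, (1 : Int)))) k =
      if (pvParts k).length ≠ 1 ∧ e ∈ pvParts k then ((l.map Prod.snd).count k : Int) else 0 := by
  induction l with
  | nil => simp [pvSum]
  | cons q l ih =>
    rw [List.filter_cons]
    by_cases hcond : (pvParts q.2).length ≠ 1 ∧ e ∈ pvParts q.2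
    · rw [if_pos (by simpa using hcond), List.map_cons, pv_sum_cons, ih, List.map_cons,
        List.count_cons]
      by_cases hk : k = q.2
      · subst hk
        rw [if_pos rfl, if_pos hcond, if_pos hcond, if_pos (beq_self_eq_true q.2)]
        push_cast
        ring
      · have hbk : ¬((q.2 == k) = true) := by simp [Ne.symm hk]
        rw [if_neg hk, if_neg hbk]
        simp
    · rw [if_neg (by simpa using hcond), ih, List.map_cons, List.count_cons]
      by_cases hk : k = q.2
      · subst hk
        rw [if_neg hcond, if_neg hcond]
      · have hbk : ¬((q.2 == k) = true) := by simp [Ne.symm hk]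
        rw [if_neg hbk]
        simp

theorem pv_sum_map_keys (ks : List String) (g : String → Int) (k : String) (hnd : ks.Nodup) :
    pvSum (ks.map (fun a => (a, g a))) k = if k ∈ ks then g k else 0 := by
  induction ks with
  | nil => simp [pvSum]
  | cons a ks ih =>
    rw [List.map_cons, pv_sum_cons, ih (List.nodup_cons.mp hnd).2]
    by_cases hka : k = a
    · subst hka
      simp [(List.nodup_cons.mp hnd).1]
    · simp [hka]

theorem pv_sum_items (d : PySem.Dict String Int) (k : String) (hnd : d.keys.Nodup) :
    pvSum d.items k = d.getD k 0 := by
  rw [PySem.Dict.items_eq_map_keys d hnd 0, pv_sum_map_keys _ _ _ hnd]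
  by_cases hk : k ∈ d.keys
  · simp [hk]
  · have hc : d.contains k = false := by
      rw [PySem.Dict.contains_eq_decide_mem_keys]; simpa using hk
    simp [hk, PySem.Dict.getD_of_not_contains d 0 hc]

theorem pv_wfold_getD (ps : List String) (e : String)
    (w : PySem.Dict String (PySem.Dict String Int)) (q : String) (hnd : ps.Nodup) :
    (pvWFold ps e w).getD q PySem.Dict.empty =
      if q ∈ ps then
        (w.getD q PySem.Dict.empty).insert e ((w.getD q PySem.Dict.empty).getD e 0 + 1)
      else w.getD q PySem.Dict.empty := by
  induction ps generalizing w with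
  | nil => simp [pvWFold]
  | cons pt ps ih =>
    show (pvWFold ps e (w.insert pt _)).getD q PySem.Dict.empty = _
    rw [ih _ (List.nodup_cons.mp hnd).2]
    by_cases hq : q ∈ ps
    · have hne : q ≠ pt := fun h => (List.nodup_cons.mp hnd).1 (h ▸ hq)
      simp [hq, hne, PySem.Dict.getD_insert]
    · by_cases hq2 : q = pt
      · subst hq2
        simp [hq]
      · simp [hq, hq2, PySem.Dict.getD_insert]

theorem pv_enum_append (l : List (String × String)) (x : String × String) (s : Int) :
    PySem.List.enumerate (l ++ [x]) s = PySem.List.enumerate l s ++ [(s + l.length, x)] := by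
  induction l generalizing s with
  | nil => simp [PySem.List.enumerate_nil, PySem.List.enumerate_cons]
  | cons y l ih =>
    simp only [List.cons_append, PySem.List.enumerate_cons, ih, List.length_cons]
    have harith : s + 1 + (l.length : Int) = s + ((l.length + 1 : Nat) : Int) := by
      push_cast; ring
    rw [harith]

theorem pv_enum_mem_bound (l : List (String × String)) (p : Int × (String × String))
    (hp : p ∈ PySem.List.enumerate l 0) : 0 ≤ p.1 ∧ p.1 < l.length := by
  have h1 : p.1 ∈ PySem.List.pyRange 0 (0 + l.length) := by
    rw [← PySem.List.map_fst_enumerate l 0]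
    exact List.mem_map_of_mem hp
  rw [PySem.List.mem_pyRange_one] at h1
  omega

theorem pv_AD_concat (l : List (String × String)) (x : String × String) :
    pvAD (l ++ [x]) = pvInner x.2 l (pvAdd (pvAD l) x.2 1) := by
  unfold pvAD
  rw [pv_enum_append l x 0]
  unfold pvALoop
  rw [List.foldl_append]
  have hbase :
      List.foldl (fun d ip => pvInner ip.2.2 (PySem.List.slice (l ++ [x]) none (some ip.1)) (pvAdd d ip.2.2 1))
        PySem.Dict.empty (PySem.List.enumerate l 0) =
      List.foldl (fun d ip => pvInner ip.2.2 (PySem.List.slice l none (some ip.1)) (pvAdd d ip.2.2 1))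
        PySem.Dict.empty (PySem.List.enumerate l 0) := by
    apply PySem.List.foldl_congr_mem
    intro acc ip hip
    have hb := pv_enum_mem_bound l ip hip
    rw [PySem.List.slice_to _ hb.1, PySem.List.slice_to _ hb.1,
        List.take_append_of_le_length (by omega)]
  rw [hbase]
  simp only [List.foldl_cons, List.foldl_nil]
  have hslice : PySem.List.slice (l ++ [x]) none (some ((0 : Int) + l.length)) = l := by
    rw [zero_add, PySem.List.slice_to_natCast, List.take_left]
  rw [hslice]

theorem pv_BS_concat (l : List (String × String)) (x : String × String) :
    pvBS (l ++ [x]) = pvBStep (pvBS l) x := by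
  simp [pvBS, List.foldl_append]

theorem pv_main (l : List (String × String)) :
    (pvBS l).1 = pvAD l ∧ (pvBS l).1.keys.Nodup ∧
    (∀ k, (pvBS l).1.contains k = true ↔ k ∈ l.map Prod.snd) ∧
    (∀ e, ((pvBS l).2.getD e PySem.Dict.empty).keys.Nodup) ∧
    (∀ e p, p ∈ ((pvBS l).2.getD e PySem.Dict.empty).items → p.1 ∈ l.map Prod.snd) ∧
    (∀ e k, ((pvBS l).2.getD e PySem.Dict.empty).getD k 0 =
      if (pvParts k).length ≠ 1 ∧ e ∈ pvParts k then ((l.map Prod.snd).count k : Int) else 0) := by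
  induction l using List.reverseRecOn with
  | nil =>
    refine ⟨rfl, PySem.Dict.nodup_keys_empty, ?_, ?_, ?_, ?_⟩
    · intro k
      rw [show (pvBS []).1 = PySem.Dict.empty from rfl, PySem.Dict.contains_empty]
      simp
    · intro e
      rw [show (pvBS []).2 = PySem.Dict.empty from rfl, PySem.Dict.getD_empty]
      exact PySem.Dict.nodup_keys_empty
    · intro e p hp
      rw [show (pvBS []).2 = PySem.Dict.empty from rfl, PySem.Dict.getD_empty] at hp
      exact absurd hp fun h => List.not_mem_nil h
    · intro e k
      rw [show (pvBS []).2 = PySem.Dict.empty from rfl, PySem.Dict.getD_empty,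
        PySem.Dict.getD_empty]
      simp
  | append_singleton l x ih =>
    obtain ⟨ih1, ih2, ih3, ih4, ih5, ih6⟩ := ih
    rw [pv_BS_concat]
    simp only [pvBStep]
    have hc1nd : (pvAdd (pvBS l).1 x.2 1).keys.Nodup :=
      PySem.Dict.nodup_keys_insert _ _ _ ih2
    have hc1mem : ∀ k, (pvAdd (pvBS l).1 x.2 1).contains k = true ↔
        k ∈ (l ++ [x]).map Prod.snd := by
      intro k
      show ((pvBS l).1.insert x.2 _).contains k = true ↔ _
      rw [PySem.Dict.contains_insert]
      simp only [List.map_append, List.mem_append, Bool.or_eq_true, beq_iff_eq]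
      rw [ih3 k]
      simp [or_comm]
    have hbump : pvBump (((pvBS l).2.getD x.2 PySem.Dict.empty).items) (pvAdd (pvBS l).1 x.2 1) =
        pvUpd (pvAdd (pvBS l).1 x.2 1) (pvSum (((pvBS l).2.getD x.2 PySem.Dict.empty).items)) := by
      apply pv_bump_upd _ _ hc1nd
      intro p hp
      rw [hc1mem p.1]
      simp only [List.map_append, List.mem_append]
      exact Or.inl (ih5 x.2 p hp)
    have hinner : pvInner x.2 l (pvAdd (pvBS l).1 x.2 1) =
        pvUpd (pvAdd (pvBS l).1 x.2 1)
          (pvSum ((l.filter (fun q => decide ((pvParts q.2).length ≠ 1 ∧ x.2 ∈ pvParts q.2))).map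
            (fun q => (q.2, (1 : Int))))) := by
      rw [pv_inner_bump]
      apply pv_bump_upd _ _ hc1nd
      intro p hp
      rw [hc1mem p.1]
      simp only [List.map_append, List.mem_append]
      left
      obtain ⟨q, hq, hqe⟩ := List.mem_map.mp hp
      rw [← hqe]
      exact List.mem_map_of_mem (List.mem_of_mem_filter hq)
    have hcounts : pvBump (((pvBS l).2.getD x.2 PySem.Dict.empty).items) (pvAdd (pvBS l).1 x.2 1) =
        pvAD (l ++ [x]) := by
      rw [pv_AD_concat, ← ih1, hbump, hinner]
      apply pv_upd_congr
      intro k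
      rw [pv_sum_items _ _ (ih4 x.2), ih6 x.2 k, pv_sum_filter]
    refine ⟨hcounts, ?_, ?_, ?_, ?_, ?_⟩
    · rw [hbump, pv_upd_keys]; exact hc1nd
    · intro k
      rw [hbump, pv_upd_contains]
      exact hc1mem k
    · -- nodup keys of every bucket
      intro e
      by_cases hm : (pvParts x.2).length ≠ 1
      · simp only [if_pos hm]
        rw [pv_wfold_getD _ _ _ _ (PySem.List.nodup_dedup _)]
        by_cases he : e ∈ PySem.List.dedup (pvParts x.2)
        · simp only [if_pos he]
          exact PySem.Dict.nodup_keys_insert _ _ _ (ih4 e)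
        · simp only [if_neg he]; exact ih4 e
      · simp only [if_neg hm]; exact ih4 e
    · -- bucket item keys are names of the list
      intro e p hp
      simp only [List.map_append, List.mem_append]
      by_cases hm : (pvParts x.2).length ≠ 1
      · simp only [if_pos hm] at hp
        rw [pv_wfold_getD _ _ _ _ (PySem.List.nodup_dedup _)] at hp
        by_cases he : e ∈ PySem.List.dedup (pvParts x.2)
        · simp only [if_pos he] at hp
          rcases (PySem.Dict.mem_items_insert _ _ _ _).mp hp with h | h
          · right; simp [h]
          · exact Or.inl (ih5 e p h.1)
        · simp only [if_neg he] at hp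
          exact Or.inl (ih5 e p hp)
      · simp only [if_neg hm] at hp
        exact Or.inl (ih5 e p hp)
    · -- bucket counts
      intro e k
      have hcount : (((l ++ [x]).map Prod.snd).count k : Int) =
          ((l.map Prod.snd).count k : Int) + (if k = x.2 then 1 else 0) := by
        simp only [List.map_append, List.count_append]
        by_cases hk : k = x.2
        · subst hk; simp
        · simp [hk, Ne.symm hk]
      by_cases hm : (pvParts x.2).length ≠ 1
      · simp only [if_pos hm]
        rw [pv_wfold_getD _ _ _ _ (PySem.List.nodup_dedup _)]
        by_cases he : e ∈ PySem.List.dedup (pvParts x.2)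
        · simp only [if_pos he]
          have he' : e ∈ pvParts x.2 := (PySem.List.mem_dedup _ _).mp he
          rw [PySem.Dict.getD_insert]
          by_cases hk : k = x.2
          · subst hk
            rw [if_pos rfl, ih6 e x.2, hcount]
            simp [hm, he']
          · simp only [if_neg hk]
            rw [ih6 e k, hcount]
            simp [hk]
        · simp only [if_neg he]
          have he' : e ∉ pvParts x.2 := fun h => he ((PySem.List.mem_dedup _ _).mpr h)
          rw [ih6 e k, hcount]
          by_cases hk : k = x.2
          · subst hk
            simp [he']
          · simp [hk]
      · simp only [if_neg hm]
        rw [ih6 e k, hcount]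
        by_cases hk : k = x.2
        · subst hk
          simp only [ne_eq, not_not] at hm
          simp [hm]
        · simp [hk]

-- ===== VERDICT (by name: the statement is the Claim_ definition above) =====
theorem countEntities_spec : Claim_equal_countEntities := by
  intro l _
  show countEntities l = countEntities_alt l
  rw [pv_countEntities_eq, pv_countEntities_alt_eq, (pv_main l).1]
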